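-- pv_equiv track=rewrite | github.com/komaksym/biggitybiggityO | src/scraping/leetcode_solutions/solutions/naming-a-company.py | distinctNames
-- ===== SOURCE A (Python) =====
-- def distinctNames(ideas):
--     lookup = [set() for _ in range(26)]
--     for x in ideas:
--         lookup[ord(x[0])-ord('a')].add(x[1:])
--     result = 0
--     for i in range(len(lookup)):
--         for j in range(i+1, len(lookup)):
--             common = len(lookup[i]&lookup[j])
--             result += (len(lookup[i])-common)*(len(lookup[j])-common)
--     return result*2
-- ===== SOURCE B (Python) =====
-- def distinctNames(ideas):
--     # Suffix-centric alternative: distinct suffixes + a (first-letter, suffix) pair set;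
--     # for each letter pair count suffixes exclusive to each side directly.
--     suffixes = list(dict.fromkeys(x[1:] for x in ideas))
--     pairs = {(x[0], x[1:]) for x in ideas}
--     total = 0
--     for i in range(26):
--         a = chr(97 + i)
--         for j in range(i + 1, 26):
--             b = chr(97 + j)
--             only_a = sum(1 for s in suffixes if (a, s) in pairs and (b, s) not in pairs)
--             only_b = sum(1 for s in suffixes if (b, s) in pairs and (a, s) not in pairs)
--             total += only_a * only_b
--     return 2 * total
-- ===== Notes on version B (the rewrite author's own statement) =====
-- stated objective: alternative
-- what changed: A buckets ideas into 26 first-letter suffix sets and takes pairwise set intersections; B inverts the view: it builds a distinct-suffix list and a (first-letter, suffix) pair set once, then for each letter pair counts the suffixes exclusive to each side directly, multiplying the two exclusive counts.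
-- outside the precondition, e.g. on distinctNames(['Ga', 'ab', 'cd']): A returns 4, B returns 2
import Mathlib
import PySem

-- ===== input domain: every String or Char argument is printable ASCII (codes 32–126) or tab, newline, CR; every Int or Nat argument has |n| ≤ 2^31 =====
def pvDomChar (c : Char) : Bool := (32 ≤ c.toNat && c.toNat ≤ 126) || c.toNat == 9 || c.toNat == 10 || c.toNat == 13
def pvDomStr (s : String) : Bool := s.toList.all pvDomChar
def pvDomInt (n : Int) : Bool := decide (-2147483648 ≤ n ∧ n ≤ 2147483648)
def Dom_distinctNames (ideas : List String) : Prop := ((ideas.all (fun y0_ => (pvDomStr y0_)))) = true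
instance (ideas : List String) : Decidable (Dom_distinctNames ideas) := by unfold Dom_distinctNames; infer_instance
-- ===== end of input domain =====

-- B replaces A's 26 first-letter buckets and pairwise set intersections by a suffix-centric
-- view (a distinct-suffix list plus a (first-letter, suffix) pair set), counting for each letter
-- pair the suffixes exclusive to each side; a different traversal of the same cost class.

-- ===== PORT A =====
-- for x in ideas: lookup[ord(x[0]) - ord('a')].add(x[1:])   (x[0] on "" raises IndexError:
-- outside Pre_; pySetD/pyGetD keep Python's negative-list-index semantics)
def pvStepA (lk : List (PySem.Set String)) (x : String) : List (PySem.Set String) :=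
  let i : Int := (match PySem.Str.pyGet? x 0 with | some c => (c.toNat : Int) | none => 0) - 97
  PySem.List.pySetD lk i
    (PySem.Set.add (PySem.List.pyGetD lk i PySem.Set.empty) (PySem.Str.slice x (some 1) none))

def distinctNames (ideas : List String) : Int :=
  let lookup := ideas.foldl pvStepA
    ((PySem.List.pyRange 0 26 1).map (fun _ => (PySem.Set.empty : PySem.Set String)))
  let result : Int := (PySem.List.pyRange 0 ((lookup.length : Int)) 1).foldl (fun result i =>
    (PySem.List.pyRange (i + 1) ((lookup.length : Int)) 1).foldl (fun result j =>
      let common : Int := PySem.Set.len (PySem.Set.inter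
        (PySem.List.pyGetD lookup i PySem.Set.empty) (PySem.List.pyGetD lookup j PySem.Set.empty))
      result + (PySem.Set.len (PySem.List.pyGetD lookup i PySem.Set.empty) - common)
             * (PySem.Set.len (PySem.List.pyGetD lookup j PySem.Set.empty) - common)) result) 0
  result * 2

-- ===== PORT B =====
def pvSuf (x : String) : String := PySem.Str.slice x (some 1) none   -- x[1:]
def pvFirst (x : String) : Char := (PySem.Str.pyGet? x 0).getD 'a'   -- x[0] ("" is outside Pre_)

def distinctNames_alt (ideas : List String) : Int :=
  let suffixes := PySem.List.dedup (ideas.map pvSuf)                 -- list(dict.fromkeys(...))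
  let pairs : PySem.Set (Char × String) :=
    PySem.Set.ofList (ideas.map (fun x => (pvFirst x, pvSuf x)))     -- {(x[0], x[1:]) for x in ideas}
  let total : Int := (PySem.List.pyRange 0 26 1).foldl (fun total i =>
    (PySem.List.pyRange (i + 1) 26 1).foldl (fun total j =>
      let a : Char := Char.ofNat (97 + i).toNat                      -- chr(97 + i)
      let b : Char := Char.ofNat (97 + j).toNat                      -- chr(97 + j)
      let onlyA : Int := (suffixes.countP
        (fun s => PySem.Set.contains pairs (a, s) && !PySem.Set.contains pairs (b, s)) : Nat)
      let onlyB : Int := (suffixes.countP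
        (fun s => PySem.Set.contains pairs (b, s) && !PySem.Set.contains pairs (a, s)) : Nat)
      total + onlyA * onlyB) total) 0
  2 * total

-- ===== PRECONDITION & SPEC =====
-- Pre_ excludes (a) inputs on which A raises IndexError (an empty idea, or a first character
-- outside 'G'..'z'), and (b) ideas whose first character lies in 'G'..'`': there A returns only
-- because Python's negative list index wraps into an unrelated lowercase bucket — an accidental
-- merge no caller would specify — while B counts lowercase first letters only.
def Pre_distinctNames (ideas : List String) : Prop :=
  ∀ x ∈ ideas, x.toList ≠ [] ∧ 97 ≤ (x.toList.headD 'a').toNat ∧ (x.toList.headD 'a').toNat ≤ 122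
instance (ideas : List String) : Decidable (Pre_distinctNames ideas) := by
  unfold Pre_distinctNames; infer_instance

def pvWitness_distinctNames : List String := ["coffee", "donuts", "time", "toffee"]

def Spec_distinctNames (ideas : List String) (out : Int) : Prop := out = distinctNames_alt ideas
instance (ideas : List String) (out : Int) : Decidable (Spec_distinctNames ideas out) := by
  unfold Spec_distinctNames; infer_instance

-- ===== CLAIM (what is proved, stated in full; the proofs are below) =====
def Claim_equal_distinctNames : Prop := ∀ (ideas : List String), Dom_distinctNames ideas →
  Pre_distinctNames ideas → Spec_distinctNames ideas (distinctNames ideas)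

-- ===== LEMMAS AND PROOFS =====

def pvKey (x : String) : Char × String := (pvFirst x, pvSuf x)
def pvOK (x : String) : Prop :=
  x.toList ≠ [] ∧ 97 ≤ (x.toList.headD 'a').toNat ∧ (x.toList.headD 'a').toNat ≤ 122

lemma pvGetDSet {α : Type} (l : List α) (k i : Nat) (v d : α) (hk : k < l.length) :
    (l.set k v).getD i d = if i = k then v else l.getD i d := by
  simp only [List.getD_eq_getElem?_getD, List.getElem?_set]
  split
  · rename_i h; subst h; simp
  · rename_i h; rw [if_neg (by omega)]

lemma pvCharToNat (n : Nat) (h : n < 200) : (Char.ofNat n).toNat = n := by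
  have : n.isValidChar := by unfold Nat.isValidChar; omega
  simp [Char.ofNat, this]

lemma pvFirst_eq (x : String) : pvFirst x = x.toList.headD 'a' := by
  simp [pvFirst, PySem.Str.pyGet?, PySem.List.pyGet?_zero, List.headD_eq_head?_getD,
    List.head?_eq_getElem?]

lemma pvStepA_eq (lk : List (PySem.Set String)) (x : String)
    (hok : pvOK x) :
    pvStepA lk x = lk.set ((x.toList.headD 'a').toNat - 97)
      (PySem.Set.add (lk.getD ((x.toList.headD 'a').toNat - 97) PySem.Set.empty) (pvSuf x)) := by
  obtain ⟨hne, h1, h2⟩ := hok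
  obtain ⟨c, cs, hx⟩ : ∃ c cs, x.toList = c :: cs := by
    cases h : x.toList with
    | nil => exact absurd h hne
    | cons c cs => exact ⟨c, cs, rfl⟩
  have hget : PySem.Str.pyGet? x 0 = some c := by
    simp [PySem.Str.pyGet?, hx]
  have hc : (x.toList.headD 'a') = c := by simp [hx]
  rw [hc] at h1 h2
  have hidx : ((c.toNat : Int) - 97) = ((c.toNat - 97 : Nat) : Int) := by omega
  unfold pvStepA
  rw [hget]
  simp only [hidx, PySem.List.pySetD_natCast, PySem.List.pyGetD_natCast, pvSuf, hc]

lemma pvFoldA_inv (l : List String) : ∀ (lk : List (PySem.Set String)), lk.length = 26 →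
    (∀ x ∈ l, pvOK x) →
    (l.foldl pvStepA lk).length = 26 ∧
    ∀ i, i < 26 →
      (((lk.getD i PySem.Set.empty).Nodup → ((l.foldl pvStepA lk).getD i PySem.Set.empty).Nodup) ∧
      (∀ s, s ∈ (l.foldl pvStepA lk).getD i PySem.Set.empty ↔
        s ∈ lk.getD i PySem.Set.empty ∨ (Char.ofNat (97 + i), s) ∈ l.map pvKey)) := by
  induction l with
  | nil => intro lk hlen _; simpa using hlen
  | cons x t ih =>
    intro lk hlen hok
    have hokx := hok x (by simp)
    have hstep := pvStepA_eq lk x hokx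
    set k := ((x.toList.headD 'a').toNat - 97) with hk
    have hc : (x.toList.headD 'a') = Char.ofNat (97 + k) := by
      have := hokx.2.1; have := hokx.2.2
      rw [hk]
      have : 97 + ((x.toList.headD 'a').toNat - 97) = (x.toList.headD 'a').toNat := by omega
      rw [this, Char.ofNat_toNat]
    have hklt : k < 26 := by have := hokx.2.1; have := hokx.2.2; omega
    have hlen' : (lk.set k (PySem.Set.add (lk.getD k PySem.Set.empty) (pvSuf x))).length = 26 := by
      simpa using hlen
    obtain ⟨ihlen, ihspec⟩ := ih _ hlen' (fun y hy => hok y (by simp [hy]))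
    constructor
    · simpa [hstep] using ihlen
    · intro i hi
      obtain ⟨ihnd, ihmem⟩ := ihspec i hi
      rw [pvGetDSet _ _ _ _ _ (by omega)] at ihnd ihmem
      constructor
      · intro hnd
        simp only [List.foldl_cons, hstep]
        apply ihnd
        by_cases hik : i = k
        · rw [if_pos hik]; subst hik; exact PySem.Set.nodup_add _ _ hnd
        · rw [if_neg hik]; exact hnd
      · intro s
        simp only [List.foldl_cons, hstep]
        by_cases hik : i = k
        · subst hik
          simp only [ihmem s, if_true, PySem.Set.mem_add, List.map_cons, List.mem_cons,
            pvKey, pvFirst_eq, hc, Prod.mk.injEq, true_and]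
          tauto
        · have hne : ¬ ((Char.ofNat (97 + i), s) = pvKey x) := by
            intro h
            have h1 : (Char.ofNat (97 + i)) = pvFirst x := congrArg Prod.fst h
            rw [pvFirst_eq, hc] at h1
            have h2 := congrArg Char.toNat h1
            rw [pvCharToNat _ (by omega), pvCharToNat _ (by omega)] at h2
            omega
          simp only [ihmem s, if_neg hik, List.map_cons, List.mem_cons]
          tauto

def pvBase : List (PySem.Set String) :=
  (PySem.List.pyRange 0 26 1).map (fun _ => (PySem.Set.empty : PySem.Set String))

lemma pvBase_len : pvBase.length = 26 := by
  simp [pvBase, PySem.List.pyRange_one]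

lemma pvBase_getD (i : Nat) : pvBase.getD i PySem.Set.empty = PySem.Set.empty := by
  simp only [pvBase, List.getD_eq_getElem?_getD, List.getElem?_map]
  cases (PySem.List.pyRange 0 26 1)[i]? <;> simp [PySem.Set.empty]

lemma pvLookup_spec (ideas : List String) (hpre : ∀ x ∈ ideas, pvOK x) :
    (ideas.foldl pvStepA pvBase).length = 26 ∧
    ∀ i, i < 26 →
      ((ideas.foldl pvStepA pvBase).getD i PySem.Set.empty).Nodup ∧
      ∀ s, s ∈ (ideas.foldl pvStepA pvBase).getD i PySem.Set.empty ↔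
        (Char.ofNat (97 + i), s) ∈ ideas.map pvKey := by
  obtain ⟨h1, h2⟩ := pvFoldA_inv ideas pvBase pvBase_len hpre
  refine ⟨h1, fun i hi => ?_⟩
  obtain ⟨hnd, hmem⟩ := h2 i hi
  rw [pvBase_getD] at hnd hmem
  exact ⟨hnd (by simp [PySem.Set.empty]), fun s => by simpa [PySem.Set.empty] using hmem s⟩

lemma pvFilterSplit {α : Type} (l : List α) (p q : α → Bool) :
    (l.filter p).length
      = (l.filter (fun x => p x && q x)).length + (l.filter (fun x => p x && !q x)).length := by
  induction l with
  | nil => simp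
  | cons x t ih => by_cases hp : p x <;> by_cases hq : q x <;> simp [hp, hq] <;> omega

lemma pvLenEq {t u : List String} (ht : t.Nodup) (hu : u.Nodup) (h : ∀ s, s ∈ t ↔ s ∈ u) :
    t.length = u.length := ((List.perm_ext_iff_of_nodup ht hu).mpr h).length_eq

lemma pvQ_mem_ded (ideas : List String) (c : Char) (s : String)
    (h : (c, s) ∈ ideas.map pvKey) : s ∈ PySem.List.dedup (ideas.map pvSuf) := by
  obtain ⟨x, hx, hkey⟩ := List.mem_map.mp h
  have : s = pvSuf x := by simpa [pvKey, Prod.ext_iff] using congrArg Prod.snd hkey.symm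
  simp only [PySem.List.mem_dedup]
  exact List.mem_map.mpr ⟨x, hx, this.symm⟩

-- the per-(i,j) term of A equals the per-(i,j) term of B
lemma pvTermEq (ideas : List String) (hpre : ∀ x ∈ ideas, pvOK x) (ni nj : Nat)
    (hij : ni < nj) (hj : nj < 26) :
    let lookup := ideas.foldl pvStepA pvBase
    let ded := PySem.List.dedup (ideas.map pvSuf)
    let pairs := PySem.Set.ofList (ideas.map (fun x => (pvFirst x, pvSuf x)))
    let a := Char.ofNat (97 + ni)
    let b := Char.ofNat (97 + nj)
    let La := lookup.getD ni PySem.Set.empty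
    let Lb := lookup.getD nj PySem.Set.empty
    let common : Int := PySem.Set.len (PySem.Set.inter La Lb)
    (PySem.Set.len La - common) * (PySem.Set.len Lb - common)
      = ((ded.countP (fun s => PySem.Set.contains pairs (a, s) && !PySem.Set.contains pairs (b, s)) : Nat) : Int)
      * ((ded.countP (fun s => PySem.Set.contains pairs (b, s) && !PySem.Set.contains pairs (a, s)) : Nat) : Int) := by
  intro lookup ded pairs a b La Lb common
  obtain ⟨hlen, hspec⟩ := pvLookup_spec ideas hpre
  obtain ⟨hndA, hmemA⟩ := hspec ni (by omega)
  obtain ⟨hndB, hmemB⟩ := hspec nj (by omega)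
  have hpairs : ∀ y : Char × String, PySem.Set.contains pairs y = decide (y ∈ ideas.map pvKey) := by
    intro y
    have hiff : PySem.Set.contains pairs y = true ↔ y ∈ ideas.map pvKey := by
      rw [show pairs = PySem.Set.ofList (ideas.map pvKey) from rfl, PySem.Set.contains_iff]
      exact PySem.Set.mem_ofList _ _
    by_cases h : y ∈ ideas.map pvKey
    · rw [decide_eq_true h]; exact hiff.mpr h
    · simp only [h, decide_false]
      exact Bool.eq_false_iff.mpr (fun hc => h (hiff.mp hc))
  have hded_nd : ded.Nodup := PySem.List.nodup_dedup _
  set Qa : String → Bool := fun s => decide ((a, s) ∈ ideas.map pvKey) with hQa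
  set Qb : String → Bool := fun s => decide ((b, s) ∈ ideas.map pvKey) with hQb
  -- lengths as filters over ded
  have hLa : La.length = (ded.filter Qa).length := by
    refine pvLenEq hndA (hded_nd.filter _) fun s => ?_
    rw [List.mem_filter]
    constructor
    · intro h
      exact ⟨pvQ_mem_ded _ _ _ ((hmemA s).mp h),
        by simp only [hQa]; exact decide_eq_true ((hmemA s).mp h)⟩
    · rintro ⟨-, h⟩
      simp only [hQa] at h
      exact (hmemA s).mpr (of_decide_eq_true h)
  have hLb : Lb.length = (ded.filter Qb).length := by
    refine pvLenEq hndB (hded_nd.filter _) fun s => ?_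
    rw [List.mem_filter]
    constructor
    · intro h
      exact ⟨pvQ_mem_ded _ _ _ ((hmemB s).mp h),
        by simp only [hQb]; exact decide_eq_true ((hmemB s).mp h)⟩
    · rintro ⟨-, h⟩
      simp only [hQb] at h
      exact (hmemB s).mpr (of_decide_eq_true h)
  have hC : (PySem.Set.inter La Lb).length = (ded.filter (fun s => Qa s && Qb s)).length := by
    refine pvLenEq (PySem.Set.nodup_inter _ _ hndA) (hded_nd.filter _) fun s => ?_
    rw [List.mem_filter, PySem.Set.mem_inter]
    constructor
    · rintro ⟨h1, h2⟩
      exact ⟨pvQ_mem_ded _ _ _ ((hmemA s).mp h1),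
        by simp only [hQa, hQb, Bool.and_eq_true, decide_eq_true_eq]
           exact ⟨(hmemA s).mp h1, (hmemB s).mp h2⟩⟩
    · rintro ⟨-, h⟩
      simp only [hQa, hQb, Bool.and_eq_true, decide_eq_true_eq] at h
      exact ⟨(hmemA s).mpr h.1, (hmemB s).mpr h.2⟩
  -- B's counts
  have hcA : ded.countP (fun s => PySem.Set.contains pairs (a, s) && !PySem.Set.contains pairs (b, s))
      = (ded.filter (fun s => Qa s && !Qb s)).length := by
    rw [← List.countP_eq_length_filter]
    exact List.countP_congr (fun s _ => by simp only [hpairs, hQa, hQb])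
  have hcB : ded.countP (fun s => PySem.Set.contains pairs (b, s) && !PySem.Set.contains pairs (a, s))
      = (ded.filter (fun s => Qb s && !Qa s)).length := by
    rw [← List.countP_eq_length_filter]
    exact List.countP_congr (fun s _ => by simp only [hpairs, hQa, hQb])
  have hsplitA := pvFilterSplit ded Qa Qb
  have hsplitB := pvFilterSplit ded Qb Qa
  have hcomm : (ded.filter (fun s => Qb s && Qa s)).length
      = (ded.filter (fun s => Qa s && Qb s)).length := by
    congr 1
    exact List.filter_congr (fun s _ => by rw [Bool.and_comm])
  have hlenLa : PySem.Set.len La = (La.length : Int) := by simp [PySem.Set.len]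
  have hlenLb : PySem.Set.len Lb = (Lb.length : Int) := by simp [PySem.Set.len]
  have hlenC : common = ((PySem.Set.inter La Lb).length : Int) := by simp [common]
  rw [hlenLa, hlenLb, hlenC, hLa, hLb, hC, hcA, hcB, hsplitA, hsplitB, hcomm]
  push_cast
  ring

set_option maxRecDepth 4000 in
set_option maxHeartbeats 1600000 in
theorem pvMain (ideas : List String) (hpre : ∀ x ∈ ideas, pvOK x) :
    distinctNames ideas = distinctNames_alt ideas := by
  have hlen : (ideas.foldl pvStepA pvBase).length = 26 := (pvLookup_spec ideas hpre).1
  have hA : distinctNames ideas =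
      (PySem.List.pyRange 0 (((ideas.foldl pvStepA pvBase).length : Nat) : Int) 1).foldl
        (fun result i =>
          (PySem.List.pyRange (i + 1) (((ideas.foldl pvStepA pvBase).length : Nat) : Int) 1).foldl
            (fun result j =>
              result + (PySem.Set.len (PySem.List.pyGetD (ideas.foldl pvStepA pvBase) i PySem.Set.empty)
                  - PySem.Set.len (PySem.Set.inter
                      (PySem.List.pyGetD (ideas.foldl pvStepA pvBase) i PySem.Set.empty)
                      (PySem.List.pyGetD (ideas.foldl pvStepA pvBase) j PySem.Set.empty)))
                * (PySem.Set.len (PySem.List.pyGetD (ideas.foldl pvStepA pvBase) j PySem.Set.empty)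
                  - PySem.Set.len (PySem.Set.inter
                      (PySem.List.pyGetD (ideas.foldl pvStepA pvBase) i PySem.Set.empty)
                      (PySem.List.pyGetD (ideas.foldl pvStepA pvBase) j PySem.Set.empty)))) result) 0
        * 2 := rfl
  have hB : distinctNames_alt ideas =
      2 * (PySem.List.pyRange 0 26 1).foldl (fun total i =>
        (PySem.List.pyRange (i + 1) 26 1).foldl (fun total j =>
          total + (((PySem.List.dedup (ideas.map pvSuf)).countP
              (fun s => PySem.Set.contains (PySem.Set.ofList (ideas.map (fun x => (pvFirst x, pvSuf x)))) (Char.ofNat (97 + i).toNat, s)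
                && !PySem.Set.contains (PySem.Set.ofList (ideas.map (fun x => (pvFirst x, pvSuf x)))) (Char.ofNat (97 + j).toNat, s)) : Nat) : Int)
            * (((PySem.List.dedup (ideas.map pvSuf)).countP
              (fun s => PySem.Set.contains (PySem.Set.ofList (ideas.map (fun x => (pvFirst x, pvSuf x)))) (Char.ofNat (97 + j).toNat, s)
                && !PySem.Set.contains (PySem.Set.ofList (ideas.map (fun x => (pvFirst x, pvSuf x)))) (Char.ofNat (97 + i).toNat, s)) : Nat) : Int)) total) 0 := rfl
  rw [hA, hB, hlen]
  simp only [Nat.cast_ofNat]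
  rw [Int.mul_comm]
  congr 1
  apply List.foldl_ext
  intro acc i hi
  apply List.foldl_ext
  intro acc2 j hj
  obtain ⟨hi0, hi26⟩ := PySem.List.mem_pyRange_one.mp hi
  obtain ⟨hj0, hj26⟩ := PySem.List.mem_pyRange_one.mp hj
  have hci : i = ((i.toNat : Nat) : Int) := by omega
  have hcj : j = ((j.toNat : Nat) : Int) := by omega
  rw [hci, hcj]
  simp only [PySem.List.pyGetD_natCast]
  have hti : ((97 : Int) + ((i.toNat : Nat) : Int)).toNat = 97 + i.toNat := by omega
  have htj : ((97 : Int) + ((j.toNat : Nat) : Int)).toNat = 97 + j.toNat := by omega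
  rw [hti, htj]
  have := pvTermEq ideas hpre i.toNat j.toNat (by omega) (by omega)
  simp only [] at this
  omega

-- ===== VERDICT (by name: the statement is the Claim_ definition above) =====
theorem distinctNames_spec : Claim_equal_distinctNames := by
  intro ideas _ hpre
  exact pvMain ideas (fun x hx => hpre x hx)
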